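-- pv_equiv track=rewrite | github.com/981377660LMT/algorithm-study | 9_排序和搜索/二分/经典题/填平后均摊/k次加1操作最大化最小值.py | maximizeMinValue2
-- ===== SOURCE A (Python) =====
-- from typing import List
-- from itertools import accumulate
--
-- def maximizeMinValue2(nums: List[int], k: int) -> List[int]:
--     """k次加1操作,让最小值最大化,返回操作后的数组"""
--     n = len(nums)
--     copy = nums[:]
--     nums = sorted(nums)
--     preSum = [0] + list(accumulate(nums))
--     nums = [0] + nums
--
--     # !最右二分求最后能和哪个数齐平
--     left, right = 0, n
--     while left <= right:
--         mid = (left + right) // 2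
--         diff = mid * nums[mid] - preSum[mid]
--         if diff <= k:
--             left = mid + 1
--         else:
--             right = mid - 1
--
--     max_ = nums[right]
--     overflow = k - (right * nums[right] - preSum[right])
--     div, mod = 0, 0
--     if right:
--         div, mod = divmod(overflow, right)  # mod个数需要再加1
--     max_ += div
--
--     for i in range(n):
--         if copy[i] < max_ + int(mod > 0):
--             copy[i] = max_ + int(mod > 0)
--             mod -= 1
--
--     return copy
-- ===== SOURCE B (Python) =====
-- def maximizeMinValue2(nums, k):
--     """k次加1操作,让最小值最大化,返回操作后的数组 (greedy linear scan instead of prefix sums + binary search)"""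
--     n = len(nums)
--     res = nums[:]
--     s = sorted(nums)
--     right, best, cost = 0, 0, 0
--     for i in range(1, n + 1):
--         if i >= 2:
--             cost += (i - 1) * (s[i - 1] - s[i - 2])
--         if cost <= k:
--             right, best = i, cost
--         else:
--             break
--     max_ = s[right - 1] if right else 0
--     mod = 0
--     if right:
--         div, mod = divmod(k - best, right)
--         max_ += div
--     for i in range(n):
--         bump = max_ + (1 if mod > 0 else 0)
--         if res[i] < bump:
--             res[i] = bump
--             mod -= 1
--     return res
-- ===== Notes on version B (the rewrite author's own statement) =====
-- stated objective: alternative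
-- what changed: Replaces A's prefix-sum table plus while-loop binary search over levelling costs by a single greedy forward scan that maintains the incremental cost (i-1)*(s[i]-s[i-1]) and stops at the last affordable level; the final original-order distribution loop is kept.
-- outside the precondition, e.g. on maximizeMinValue2([1], -40): A returns [39], B returns [1]
import Mathlib
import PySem

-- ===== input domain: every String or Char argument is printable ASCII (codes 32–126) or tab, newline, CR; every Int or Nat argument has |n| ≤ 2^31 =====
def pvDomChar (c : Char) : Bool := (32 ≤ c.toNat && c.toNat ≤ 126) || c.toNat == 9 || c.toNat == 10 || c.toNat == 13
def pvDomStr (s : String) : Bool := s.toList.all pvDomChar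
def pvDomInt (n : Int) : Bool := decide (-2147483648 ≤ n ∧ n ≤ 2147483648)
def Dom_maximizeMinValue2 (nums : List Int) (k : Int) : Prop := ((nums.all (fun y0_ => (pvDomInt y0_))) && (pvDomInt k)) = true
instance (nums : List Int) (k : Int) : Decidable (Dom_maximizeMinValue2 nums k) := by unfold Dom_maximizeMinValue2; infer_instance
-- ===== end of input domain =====

-- B replaces A's prefix-sum table and binary search by a single greedy forward scan
-- maintaining the incremental levelling cost; the final distribution loop is the same.

-- ===== PORT A =====
-- itertools.accumulate: running sums
def pvAccum : List Int → Int → List Int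
  | [], _ => []
  | x :: xs, acc => (acc + x) :: pvAccum xs (acc + x)

-- A's while-loop binary search (left, right as in the Python)
def pvBSearch (padded preSum : List Int) (k : Int) (left right : Int) : Int :=
  if _h : left ≤ right then
    let mid := PySem.Int.floordiv (left + right) 2
    let diff := mid * PySem.List.pyGetD padded mid 0 - PySem.List.pyGetD preSum mid 0
    if diff ≤ k then pvBSearch padded preSum k (mid + 1) right
    else pvBSearch padded preSum k left (mid - 1)
  else right
termination_by (right + 1 - left).toNat
decreasing_by
  · have := PySem.Int.floordiv_two_mid_bounds _h
    omega
  · have := PySem.Int.floordiv_two_mid_bounds _h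
    omega

-- the final original-order distribution loop (textually identical in A and in B)
def pvDistribute : List Int → Int → Int → List Int
  | [], _, _ => []
  | x :: xs, maxv, md =>
    let bump := maxv + (if md > 0 then 1 else 0)
    if x < bump then bump :: pvDistribute xs maxv (md - 1)
    else x :: pvDistribute xs maxv md

def maximizeMinValue2 (nums : List Int) (k : Int) : List Int :=
  let n : Int := nums.length
  let copy := nums
  let s := PySem.List.sorted nums (fun x => x) false
  let preSum : List Int := 0 :: pvAccum s 0
  let padded : List Int := 0 :: s
  let right := pvBSearch padded preSum k 0 n
  let maxv := PySem.List.pyGetD padded right 0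
  let overflow := k - (right * PySem.List.pyGetD padded right 0 - PySem.List.pyGetD preSum right 0)
  let dm : Int × Int := if right ≠ 0 then (PySem.Int.divmod? overflow right).getD (0, 0) else (0, 0)
  pvDistribute copy (maxv + dm.1) dm.2

-- ===== PORT B =====
-- B's greedy forward scan: returns (right, best) = last reachable level index and its cost
def pvScan (s : List Int) (k n : Int) (i right best cost : Int) : Int × Int :=
  if _h : i ≤ n then
    let cost' := if i ≥ 2 then
        cost + (i - 1) * (PySem.List.pyGetD s (i - 1) 0 - PySem.List.pyGetD s (i - 2) 0)
      else cost
    if cost' ≤ k then pvScan s k n (i + 1) i cost' cost'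
    else (right, best)
  else (right, best)
termination_by (n + 1 - i).toNat
decreasing_by omega

def maximizeMinValue2_alt (nums : List Int) (k : Int) : List Int :=
  let n : Int := nums.length
  let res := nums
  let s := PySem.List.sorted nums (fun x => x) false
  let rb := pvScan s k n 1 0 0 0
  let right := rb.1
  let best := rb.2
  let maxv := if right ≠ 0 then PySem.List.pyGetD s (right - 1) 0 else 0
  let dm : Int × Int := if right ≠ 0 then (PySem.Int.divmod? (k - best) right).getD (0, 0) else (0, 0)
  pvDistribute res (maxv + dm.1) dm.2

-- ===== PRECONDITION & SPEC =====
-- Pre_ restricts to the natural domain k ≥ 0 (k is a count of +1 operations): for k < 0 A's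
-- binary search falls through to right = -1 and Python's negative-index wraparound yields an
-- accidental value that no caller would specify; B is not contorted to match it.
def Pre_maximizeMinValue2 (nums : List Int) (k : Int) : Prop := 0 ≤ k
instance (nums : List Int) (k : Int) : Decidable (Pre_maximizeMinValue2 nums k) := by unfold Pre_maximizeMinValue2; infer_instance
def pvWitness_maximizeMinValue2 : List Int × Int := ([1, 3, 2], 4)

def Spec_maximizeMinValue2 (nums : List Int) (k : Int) (out : List Int) : Prop := out = maximizeMinValue2_alt nums k
instance (nums : List Int) (k : Int) (out : List Int) : Decidable (Spec_maximizeMinValue2 nums k out) := by unfold Spec_maximizeMinValue2; infer_instance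

-- ===== CLAIM (what is proved, stated in full; the proofs are below) =====
def Claim_equal_maximizeMinValue2 : Prop := ∀ (nums : List Int) (k : Int), Dom_maximizeMinValue2 nums k → Pre_maximizeMinValue2 nums k → Spec_maximizeMinValue2 nums k (maximizeMinValue2 nums k)

-- ===== LEMMAS AND PROOFS =====

-- the levelling cost, Nat-indexed: cost to raise the first m sorted elements up to the m-th
def pvFN (s : List Int) (m : Nat) : Int := m * s.getD (m - 1) 0 - (s.take m).sum

lemma pvAccum_getD (s : List Int) (a : Int) (i : Nat) (h : i < s.length) :
    (pvAccum s a).getD i 0 = a + (s.take (i + 1)).sum := by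
  induction s generalizing a i with
  | nil => simp at h
  | cons x xs ih =>
    cases i with
    | zero => simp [pvAccum]
    | succ j =>
      simp only [pvAccum, List.getD_cons_succ, List.take_succ_cons, List.sum_cons]
      rw [ih (a + x) j (by simpa using h)]
      ring

lemma pvFN_zero (s : List Int) : pvFN s 0 = 0 := by simp [pvFN]

lemma pvFN_one (s : List Int) : pvFN s 1 = 0 := by
  cases s with
  | nil => simp [pvFN]
  | cons x xs => simp [pvFN]

-- A's diff expression equals pvFN, for indices 0 ≤ m ≤ len
lemma pvF_eq (s : List Int) (m : Int) (h0 : 0 ≤ m) (h1 : m ≤ (s.length : Int)) :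
    m * PySem.List.pyGetD (0 :: s) m 0 - PySem.List.pyGetD (0 :: pvAccum s 0) m 0
      = pvFN s m.toNat := by
  rw [PySem.List.pyGetD_of_nonneg _ _ h0, PySem.List.pyGetD_of_nonneg _ _ h0]
  obtain ⟨j, rfl⟩ : ∃ j : Nat, m = (j : Int) := ⟨m.toNat, by omega⟩
  have hj : j ≤ s.length := by exact_mod_cast h1
  rcases j with _ | j
  · simp [pvFN]
  · simp only [Int.toNat_natCast, List.getD_cons_succ]
    rw [pvAccum_getD s 0 j (by omega)]
    unfold pvFN
    simp only [Nat.add_sub_cancel]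
    push_cast
    ring

lemma sum_take_succ (s : List Int) (m : Nat) (h : m < s.length) :
    (s.take (m + 1)).sum = (s.take m).sum + s.getD m 0 := by
  rw [List.getD_eq_getElem s 0 h]
  exact List.sum_take_succ s m h

-- B's incremental update reproduces pvFN
lemma pvFN_succ (s : List Int) (m : Nat) (h1 : 1 ≤ m) (h : m + 1 ≤ s.length) :
    pvFN s (m + 1) = pvFN s m + m * (s.getD m 0 - s.getD (m - 1) 0) := by
  obtain ⟨m', rfl⟩ : ∃ m', m = m' + 1 := ⟨m - 1, by omega⟩
  unfold pvFN
  rw [sum_take_succ s (m' + 1) (by omega)]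
  simp only [Nat.add_sub_cancel]
  push_cast
  ring

lemma pvFN_step_mono (s : List Int) (hs : s.Pairwise (· ≤ ·)) (m : Nat) (h : m + 1 ≤ s.length) :
    pvFN s m ≤ pvFN s (m + 1) := by
  rcases Nat.eq_zero_or_pos m with rfl | hm
  · rw [pvFN_zero, pvFN_one]
  · rw [pvFN_succ s m hm h]
    have hg : s.getD (m - 1) 0 ≤ s.getD m 0 := by
      have h1 : m - 1 < s.length := by omega
      have h2 : m < s.length := by omega
      rw [List.getD_eq_getElem s 0 h1, List.getD_eq_getElem s 0 h2]
      exact List.pairwise_iff_getElem.1 hs _ _ h1 h2 (by omega)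
    nlinarith [hg, Int.natCast_nonneg m]

lemma pvFN_mono (s : List Int) (hs : s.Pairwise (· ≤ ·)) (i j : Nat) (hij : i ≤ j)
    (hj : j ≤ s.length) : pvFN s i ≤ pvFN s j := by
  induction j with
  | zero =>
    have : i = 0 := Nat.le_zero.mp hij
    simp [this]
  | succ j' ih =>
    rcases Nat.lt_or_ge i (j' + 1) with h | h
    · exact le_trans (ih (by omega) (by omega)) (pvFN_step_mono s hs j' hj)
    · have : i = j' + 1 := by omega
      simp [this]

-- characterisation of A's binary search
lemma pvBSearch_char (s : List Int) (hs : s.Pairwise (· ≤ ·)) (k : Int) (l r : Int)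
    (h0 : 0 ≤ l) (h1 : l ≤ r + 1) (h2 : r ≤ (s.length : Int))
    (hl : ∀ j : Int, 0 ≤ j → j < l → pvFN s j.toNat ≤ k)
    (hr : ∀ j : Int, r < j → j ≤ (s.length : Int) → k < pvFN s j.toNat) :
    (-1 ≤ pvBSearch (0 :: s) (0 :: pvAccum s 0) k l r
      ∧ pvBSearch (0 :: s) (0 :: pvAccum s 0) k l r ≤ (s.length : Int)
      ∧ (∀ j : Int, 0 ≤ j → j ≤ pvBSearch (0 :: s) (0 :: pvAccum s 0) k l r → pvFN s j.toNat ≤ k)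
      ∧ (∀ j : Int, pvBSearch (0 :: s) (0 :: pvAccum s 0) k l r < j → j ≤ (s.length : Int) → k < pvFN s j.toNat)) := by
  rw [pvBSearch]
  split
  case isTrue hlr =>
    have hmid := PySem.Int.floordiv_two_mid_bounds hlr
    set mid := PySem.Int.floordiv (l + r) 2 with hmiddef
    have hdiff : mid * PySem.List.pyGetD (0 :: s) mid 0 - PySem.List.pyGetD (0 :: pvAccum s 0) mid 0
        = pvFN s mid.toNat := pvF_eq s mid (by omega) (by omega)
    simp only [hdiff]
    split
    case isTrue hle =>
      exact pvBSearch_char s hs k (mid + 1) r (by omega) (by omega) h2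
        (fun j hj0 hjl => by
          rcases lt_or_ge j l with h | h
          · exact hl j hj0 h
          · calc pvFN s j.toNat ≤ pvFN s mid.toNat :=
                  pvFN_mono s hs j.toNat mid.toNat (by omega) (by omega)
              _ ≤ k := hle)
        hr
    case isFalse hgt =>
      exact pvBSearch_char s hs k l (mid - 1) h0 (by omega) (by omega) hl
        (fun j hj hjn => by
          rcases lt_or_ge r j with h | h
          · exact hr j h hjn
          · calc k < pvFN s mid.toNat := by omega
              _ ≤ pvFN s j.toNat := pvFN_mono s hs mid.toNat j.toNat (by omega) (by omega))
  case isFalse hlr =>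
    exact ⟨by omega, by omega,
      fun j hj0 hjr => hl j hj0 (by omega),
      fun j hj hjn => hr j (by omega) hjn⟩
termination_by (r + 1 - l).toNat
decreasing_by
  · omega
  · omega

-- characterisation of B's scan
lemma pvScan_char (s : List Int) (hs : s.Pairwise (· ≤ ·)) (k : Int) (i right best cost : Int)
    (h1 : 1 ≤ i) (h2 : i ≤ (s.length : Int) + 1)
    (hrt : right = i - 1) (hc : cost = pvFN s (i - 1).toNat) (hb : best = cost)
    (hk : pvFN s (i - 1).toNat ≤ k) :
    (0 ≤ (pvScan s k (s.length : Int) i right best cost).1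
      ∧ (pvScan s k (s.length : Int) i right best cost).1 ≤ (s.length : Int)
      ∧ (pvScan s k (s.length : Int) i right best cost).2
          = pvFN s (pvScan s k (s.length : Int) i right best cost).1.toNat
      ∧ pvFN s (pvScan s k (s.length : Int) i right best cost).1.toNat ≤ k
      ∧ ((pvScan s k (s.length : Int) i right best cost).1 = (s.length : Int)
          ∨ k < pvFN s ((pvScan s k (s.length : Int) i right best cost).1.toNat + 1))) := by
  rw [pvScan]
  split
  case isTrue hin =>
    have hcost' : (if i ≥ 2 then
          cost + (i - 1) * (PySem.List.pyGetD s (i - 1) 0 - PySem.List.pyGetD s (i - 2) 0)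
        else cost) = pvFN s i.toNat := by
      split
      case isTrue hge2 =>
        rw [PySem.List.pyGetD_of_nonneg _ _ (by omega : (0:Int) ≤ i - 1),
            PySem.List.pyGetD_of_nonneg _ _ (by omega : (0:Int) ≤ i - 2)]
        have hm : (i - 1).toNat + 1 = i.toNat := by omega
        have := pvFN_succ s (i - 1).toNat (by omega) (by omega)
        rw [hm] at this
        rw [hc, this]
        have e1 : ((i - 1).toNat : Int) = i - 1 := by omega
        have e2 : (i - 1).toNat - 1 = (i - 2).toNat := by omega
        rw [e1, e2]
      case isFalse hlt2 =>
        have : i = 1 := by omega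
        subst this
        simpa [pvFN_one, pvFN_zero] using hc
    simp only [hcost']
    split
    case isTrue hle =>
      exact pvScan_char s hs k (i + 1) i (pvFN s i.toNat) (pvFN s i.toNat)
        (by omega) (by omega) (by omega)
        (by congr 1; omega) rfl (by convert hle using 3; omega)
    case isFalse hgt =>
      refine ⟨by omega, by omega, ?_, ?_, Or.inr ?_⟩
      · simp [hrt, hb, hc]
      · simpa [hrt] using hk
      · have : (i - 1).toNat + 1 = i.toNat := by omega
        rw [hrt, this]
        omega
  case isFalse hin =>
    have hieq : i = (s.length : Int) + 1 := by omega
    refine ⟨by omega, by omega, ?_, ?_, Or.inl (by omega)⟩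
    · simp [hrt, hb, hc]
    · simpa [hrt] using hk
termination_by ((s.length : Int) + 1 - i).toNat
decreasing_by omega

-- ===== VERDICT (by name: the statement is the Claim_ definition above) =====
theorem maximizeMinValue2_spec : Claim_equal_maximizeMinValue2 := by
  intro nums k _ hpre
  unfold Pre_maximizeMinValue2 at hpre
  unfold Spec_maximizeMinValue2
  simp only [maximizeMinValue2, maximizeMinValue2_alt]
  set s := PySem.List.sorted nums (fun x => x) false with hsdef
  have hlen : s.length = nums.length := PySem.List.length_sorted nums (fun x => x) false
  have hs : s.Pairwise (· ≤ ·) := PySem.List.sorted_pairwise nums (fun x => x)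
  have hA := pvBSearch_char s hs k 0 (nums.length : Int) (by omega) (by omega) (by omega)
    (fun j hj0 hj => by omega) (fun j hj hjn => by omega)
  have hB := pvScan_char s hs k 1 0 0 0 (by omega) (by omega) (by omega)
    (by simp [pvFN_zero]) rfl (by simpa [pvFN_zero] using hpre)
  have hcast : (s.length : Int) = (nums.length : Int) := by exact_mod_cast hlen
  rw [hcast] at hB
  set ρA := pvBSearch (0 :: s) (0 :: pvAccum s 0) k 0 (nums.length : Int) with hρA
  set rb := pvScan s k (nums.length : Int) 1 0 0 0 with hrb
  rw [hcast] at hA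
  obtain ⟨ha1, ha2, ha3, ha4⟩ := hA
  obtain ⟨hb1, hb2, hb3, hb4, hb5⟩ := hB
  have hρ : ρA = rb.1 := by
    by_contra hne
    rcases lt_or_gt_of_ne hne with h | h
    · have := ha4 rb.1 h hb2
      omega
    · rcases hb5 with he | hgt
      · omega
      · have h3 := ha3 (rb.1 + 1) (by omega) (by omega)
        have e : (rb.1 + 1).toNat = rb.1.toNat + 1 := by omega
        rw [e] at h3
        omega
  have hover : k - (ρA * PySem.List.pyGetD (0 :: s) ρA 0
      - PySem.List.pyGetD (0 :: pvAccum s 0) ρA 0) = k - rb.2 := by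
    rw [pvF_eq s ρA (by omega) (by omega), hb3, hρ]
  have hmax : PySem.List.pyGetD (0 :: s) ρA 0
      = (if rb.1 ≠ 0 then PySem.List.pyGetD s (rb.1 - 1) 0 else 0) := by
    rw [hρ]
    by_cases h0 : rb.1 = 0
    · simp [h0, PySem.List.pyGetD_zero_cons]
    · rw [if_pos h0]
      rw [PySem.List.pyGetD_of_nonneg _ _ (by omega : (0:Int) ≤ rb.1),
          PySem.List.pyGetD_of_nonneg _ _ (by omega : (0:Int) ≤ rb.1 - 1)]
      have e : rb.1.toNat = (rb.1 - 1).toNat + 1 := by omega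
      rw [e, List.getD_cons_succ]
  rw [hover, hmax, hρ]
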